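-- pv_equiv track=rewrite | github.com/dtdivyansh/CODES | search longest word.py | search
-- ===== SOURCE A (Python) =====
-- def search(sen):
--     s = ''
--     c = 0
--     cm = 0
--     sm = ''
--     for i in sen:
--         if(i==' '):
--             if(c>cm and s.isalnum()):
--                 cm = c
--                 sm = s
--             c=0
--             s=''
--         else:
--             s+=i
--             c+=1
--     if(c>cm and s.isalnum()):
--         cm = c
--         sm = s
--     return sm
-- ===== SOURCE B (Python) =====
-- def search(sen):
--     words = [w for w in sen.split(' ') if w.isalnum()]
--     return max(words, key=len, default='')
-- ===== Notes on version B (the rewrite author's own statement) =====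
-- stated objective: idiomatic
-- what changed: Replaces A's character-by-character accumulator loop (manual word buffer, length counter and running best) with a single-space str.split, a filter on isalnum and max with a length key and an empty default, preserving A's first-of-equal-lengths tie-breaking.
import Mathlib
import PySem

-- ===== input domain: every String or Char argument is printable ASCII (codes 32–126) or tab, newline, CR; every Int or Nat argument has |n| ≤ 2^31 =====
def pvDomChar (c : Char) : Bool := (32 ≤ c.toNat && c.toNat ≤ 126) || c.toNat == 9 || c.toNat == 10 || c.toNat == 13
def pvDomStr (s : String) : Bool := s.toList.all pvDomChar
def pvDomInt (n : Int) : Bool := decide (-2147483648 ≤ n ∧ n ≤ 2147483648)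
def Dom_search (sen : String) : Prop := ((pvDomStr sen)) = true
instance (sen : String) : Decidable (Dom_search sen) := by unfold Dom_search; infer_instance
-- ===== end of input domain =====

-- B replaces A's character-by-character accumulator loop by a single-space split, filter on isalnum and max by length (empty default): idiomatic; a timing run measured it faster (C-level built-ins vs a Python char loop).

-- ===== PORT A =====
-- one step of A's for-loop over the characters; state = (s, c, cm, sm)
def searchStep (st : List Char × Int × Int × List Char) (i : Char) :
    List Char × Int × Int × List Char :=
  match st with
  | (s, c, cm, sm) =>
    if i = ' ' then
      if c > cm ∧ PySem.Chars.strIsalnum s = true then ([], 0, c, s) else ([], 0, cm, sm)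
    else (s ++ [i], c + 1, cm, sm)

def search (sen : String) : String :=
  match sen.toList.foldl searchStep ([], 0, 0, []) with
  | (s, c, cm, sm) =>
    if c > cm ∧ PySem.Chars.strIsalnum s = true then String.ofList s else String.ofList sm

-- ===== PORT B =====
-- words = [w for w in sen.split(' ') if w.isalnum()]; max(words, key=len, default='')
def search_alt (sen : String) : String :=
  let words := (PySem.Chars.splitOn sen.toList [' ']).filter PySem.Chars.strIsalnum
  String.ofList (PySem.List.maxD words List.length [])

-- ===== PRECONDITION & SPEC =====
def Spec_search (sen : String) (out : String) : Prop := out = search_alt sen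
instance (sen : String) (out : String) : Decidable (Spec_search sen out) := by unfold Spec_search; infer_instance

-- ===== CLAIM (what is proved, stated in full; the proofs are below) =====
def Claim_equal_search : Prop := ∀ (sen : String), Dom_search sen → Spec_search sen (search sen)

-- ===== LEMMAS AND PROOFS =====

-- split on single spaces, with the pending word prefix s (proof-side recursion)
def splitAcc (s : List Char) : List Char → List (List Char)
  | [] => [s]
  | c :: t => if c = ' ' then s :: splitAcc [] t else splitAcc (s ++ [c]) t

-- B's running best as a fold step on (cm, sm)
def upd (st : Int × List Char) (w : List Char) : Int × List Char :=
  if (w.length : Int) > st.1 ∧ PySem.Chars.strIsalnum w = true then ((w.length : Int), w) else st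

-- A's final if-statement, on the loop state
def finishA (st : List Char × Int × Int × List Char) : List Char :=
  if st.2.1 > st.2.2.1 ∧ PySem.Chars.strIsalnum st.1 = true then st.1 else st.2.2.2

-- A's fold, started with c = |s|, computes the running best over splitAcc s t
theorem foldA_eq (t : List Char) : ∀ (s sm : List Char) (cm : Int),
    finishA (List.foldl searchStep (s, (s.length : Int), cm, sm) t)
    = (List.foldl upd (cm, sm) (splitAcc s t)).2 := by
  induction t with
  | nil =>
    intro s sm cm
    simp only [List.foldl_nil, splitAcc, List.foldl_cons, finishA, upd]
    split_ifs with h <;> rfl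
  | cons c t ih =>
    intro s sm cm
    by_cases hc : c = ' '
    · subst hc
      rcases hu : upd (cm, sm) s with ⟨cm', sm'⟩
      have hstep : searchStep (s, (s.length : Int), cm, sm) ' ' = ([], 0, cm', sm') := by
        rw [← hu]
        simp only [searchStep, upd]
        split_ifs <;> rfl
      have hih := ih [] sm' cm'
      simp only [List.length_nil, Nat.cast_zero] at hih
      rw [List.foldl_cons, hstep, hih]
      simp [splitAcc, hu]
    · have hstep : searchStep (s, (s.length : Int), cm, sm) c
          = (s ++ [c], ((s ++ [c]).length : Int), cm, sm) := by
        simp only [searchStep, if_neg hc]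
        push_cast [List.length_append]
        simp
      rw [List.foldl_cons, hstep, ih (s ++ [c]) sm cm]
      simp [splitAcc, hc]

-- PySem.Chars.splitOn.go with enough fuel is splitAcc
theorem splitOn_go_eq : ∀ (fuel : Nat) (l cur : List Char) (acc : List (List Char)),
    l.length ≤ fuel →
    PySem.Chars.splitOn.go [' '] fuel l cur acc = acc.reverse ++ splitAcc cur.reverse l := by
  intro fuel
  induction fuel with
  | zero =>
    intro l cur acc h
    have : l = [] := List.eq_nil_of_length_eq_zero (Nat.le_zero.mp h)
    subst this
    simp [PySem.Chars.splitOn.go, splitAcc]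
  | succ f ih =>
    intro l cur acc h
    cases l with
    | nil => simp [PySem.Chars.splitOn.go, splitAcc]
    | cons c rest =>
      by_cases hc : c = ' '
      · subst hc
        have hpre : ([' '] : List Char).isPrefixOf (' ' :: rest) = true := by
          simp [List.isPrefixOf]
        rw [PySem.Chars.splitOn.go]
        simp only [hpre, if_true, List.length_cons, List.length_nil, List.drop_succ_cons,
          List.drop_zero]
        rw [ih rest [] (cur.reverse :: acc) (by simp at h; omega)]
        simp [splitAcc]
      · have hpre : ([' '] : List Char).isPrefixOf (c :: rest) = false := by
          simp [List.isPrefixOf]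
          exact fun h => absurd h.symm hc
        rw [PySem.Chars.splitOn.go]
        simp only [hpre, Bool.false_eq_true, if_false]
        rw [ih rest (c :: cur) acc (by simp at h; omega)]
        simp [splitAcc, if_neg hc]

theorem splitOn_eq (l : List Char) :
    PySem.Chars.splitOn l [' '] = splitAcc [] l := by
  have := splitOn_go_eq (l.length + 1) l [] [] (by omega)
  simpa [PySem.Chars.splitOn] using this

-- the fold step underlying PySem.List.max? with key List.length
def maxStep (acc : Option (List Char)) (x : List Char) : Option (List Char) :=
  match acc with
  | none => some x
  | some m => if m.length < x.length then some x else some m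

theorem maxD_eq (ws : List (List Char)) :
    PySem.List.maxD ws List.length ([] : List Char)
      = (List.foldl maxStep none ws).getD [] := by
  unfold PySem.List.maxD PySem.List.max?
  congr 1
  apply List.foldl_ext
  intro a ha b
  cases a <;> rfl

theorem foldl_maxStep_some (l : List (List Char)) : ∀ (m : List Char),
    ∃ r, List.foldl maxStep (some m) l = some r := by
  induction l with
  | nil => exact fun m => ⟨m, rfl⟩
  | cons x t ih =>
    intro m
    rw [List.foldl_cons]
    show ∃ r, List.foldl maxStep (if m.length < x.length then some x else some m) t = some r
    split_ifs <;> exact ih _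

theorem alnum_ne_nil {w : List Char} (h : PySem.Chars.strIsalnum w = true) : w ≠ [] := by
  intro hw; subst hw; simp [PySem.Chars.strIsalnum] at h

-- invariant tying A's (cm, sm) to B's running max-Option
def RInv (cm : Int) (sm : List Char) (acc : Option (List Char)) : Prop :=
  (cm = 0 ∧ sm = [] ∧ acc = none) ∨
  (acc = some sm ∧ cm = (sm.length : Int) ∧ PySem.Chars.strIsalnum sm = true)

theorem foldB_eq (ws : List (List Char)) : ∀ (cm : Int) (sm : List Char) (acc : Option (List Char)),
    RInv cm sm acc →
    (List.foldl upd (cm, sm) ws).2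
      = (List.foldl maxStep acc (ws.filter PySem.Chars.strIsalnum)).getD sm := by
  induction ws with
  | nil =>
    intro cm sm acc hR
    rcases hR with ⟨_, hsm, hacc⟩ | ⟨hacc, _, _⟩
    · simp [hacc, hsm]
    · simp [hacc]
  | cons w t ih =>
    intro cm sm acc hR
    by_cases hal : PySem.Chars.strIsalnum w = true
    · have hlen : 0 < w.length := List.length_pos_iff.mpr (alnum_ne_nil hal)
      rcases hR with ⟨hcm, hsm, hacc⟩ | ⟨hacc, hcm, hsmal⟩
      · subst hcm; subst hsm; subst hacc
        have hgt0 : ((w.length : Int)) > (0 : Int) := by exact_mod_cast hlen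
        have hupd : upd (0, []) w = ((w.length : Int), w) := by
          simp only [upd]
          rw [if_pos ⟨hgt0, hal⟩]
        have h1 := ih ((w.length : Int)) w (some w) (Or.inr ⟨rfl, rfl, hal⟩)
        obtain ⟨r, hr⟩ := foldl_maxStep_some (t.filter PySem.Chars.strIsalnum) w
        rw [hr] at h1
        simp only [List.foldl_cons, hupd, List.filter_cons, hal, if_pos, maxStep, hr]
        simpa using h1
      · subst hacc; subst hcm
        by_cases hgt : (w.length : Int) > (sm.length : Int)
        · have hupd : upd (((sm.length : Int)), sm) w = ((w.length : Int), w) := by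
            simp [upd, hal, hgt]
          have hms : maxStep (some sm) w = some w := by
            simp only [maxStep, if_pos (show sm.length < w.length by omega)]
          have h1 := ih ((w.length : Int)) w (some w) (Or.inr ⟨rfl, rfl, hal⟩)
          obtain ⟨r, hr⟩ := foldl_maxStep_some (t.filter PySem.Chars.strIsalnum) w
          rw [hr] at h1
          simp only [List.foldl_cons, hupd, List.filter_cons, hal, if_pos, hms, hr]
          simpa using h1
        · have hupd : upd (((sm.length : Int)), sm) w = (((sm.length : Int)), sm) := by
            simp only [upd]
            rw [if_neg]
            intro hcon
            exact hgt hcon.1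
          have hms : maxStep (some sm) w = some sm := by
            simp only [maxStep, if_neg (show ¬ sm.length < w.length by omega)]
          simp only [List.foldl_cons, hupd, List.filter_cons, hal, if_pos, hms]
          exact ih _ _ _ (Or.inr ⟨rfl, rfl, hsmal⟩)
    · have hupd : upd (cm, sm) w = (cm, sm) := by
        simp [upd, hal]
      simp only [List.foldl_cons, hupd, List.filter_cons, hal]
      simp only [Bool.false_eq_true, if_false]
      exact ih _ _ _ hR

-- ===== VERDICT (by name: the statement is the Claim_ definition above) =====
theorem search_spec : Claim_equal_search := by
  intro sen _
  unfold Spec_search search search_alt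
  rw [splitOn_eq]
  have hA := foldA_eq sen.toList [] [] 0
  simp only [List.length_nil, Nat.cast_zero] at hA
  have hB := foldB_eq (splitAcc [] sen.toList) 0 [] none (Or.inl ⟨rfl, rfl, rfl⟩)
  rcases hf : List.foldl searchStep ([], 0, 0, []) sen.toList with ⟨s, c, cm, sm⟩
  rw [hf] at hA
  dsimp only [finishA] at hA
  dsimp only
  rw [← apply_ite String.ofList, hA, hB, maxD_eq]
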